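-- pv_equiv track=rewrite | github.com/PascalinDeZO/OpenDACHS | src/od_ticket_manager.py | _get_opendachs_information
-- ===== SOURCE A (Python) =====
-- def _get_opendachs_information(raw):
--     """Get OpenDACHS information.
--
--     :param dict raw: raw data
--
--     :returns: OpenDACHS information
--     :rtype: str
--     """
--     opendachs_information = ""
--     for key, value in sorted(list(raw.items()), key=lambda x: x[0]):
--         if key not in ["email", "url", "ticket"]:
--             continue
--         else:
--             if key == "email":
--                 info = "E-Mail\t: {}\n"
--             elif key == "url":
--                 info = "URL\t: {}\n"
--             else:
--                 info = "{}\t: {{}}\n".format(key.title())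
--             opendachs_information += info.format(value)
--     return opendachs_information
-- ===== SOURCE B (Python) =====
-- def _get_opendachs_information(raw):
--     """Get OpenDACHS information.
--
--     :param dict raw: raw data
--
--     :returns: OpenDACHS information
--     :rtype: str
--     """
--     result = ""
--     for key, label in (("email", "E-Mail"), ("ticket", "Ticket"), ("url", "URL")):
--         if key in raw:
--             result += "{}\t: {}\n".format(label, raw[key])
--     return result
-- ===== Notes on version B (the rewrite author's own statement) =====
-- stated objective: simpler
-- what changed: B drops A's sort of all dict items followed by a filtering scan and instead iterates a fixed ordered table of the three meaningful keys (in their sorted order) with a direct membership test/lookup for each; Pre_ excludes association lists with duplicate keys, which do not arise from a Python dict argument.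
import Mathlib
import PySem

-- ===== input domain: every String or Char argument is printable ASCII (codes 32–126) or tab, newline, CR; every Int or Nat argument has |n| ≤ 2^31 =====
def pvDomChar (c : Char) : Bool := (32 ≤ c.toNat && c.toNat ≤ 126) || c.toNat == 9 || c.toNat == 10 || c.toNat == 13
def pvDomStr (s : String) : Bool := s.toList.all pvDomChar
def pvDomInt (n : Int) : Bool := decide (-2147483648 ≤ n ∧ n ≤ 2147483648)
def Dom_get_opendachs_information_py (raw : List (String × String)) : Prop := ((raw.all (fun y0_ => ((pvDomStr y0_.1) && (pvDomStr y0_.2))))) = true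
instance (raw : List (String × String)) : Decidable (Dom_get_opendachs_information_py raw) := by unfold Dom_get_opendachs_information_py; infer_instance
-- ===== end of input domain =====

-- B replaces A's sort-then-filter over all items by a fixed ordered table of the three
-- meaningful keys with a direct lookup each (objective: simpler). Return value only; no mutation.

-- ===== PORT A =====
-- hand port of str.title(); exact on the ASCII strings of Dom (word = maximal alphabetic run)
def pvTitleChars : Bool → List Char → List Char
  | _, [] => []
  | prevAlpha, c :: rest =>
    if c.isAlpha then (if prevAlpha then c.toLower else c.toUpper) :: pvTitleChars true rest
    else c :: pvTitleChars false rest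

def pvTitle (s : String) : String := String.ofList (pvTitleChars false s.toList)

-- the body of A's loop: pick the format string by key and fill in the value
def pvFmtA (k v : String) : String :=
  if k = "email" then "E-Mail\t: " ++ v ++ "\n"
  else if k = "url" then "URL\t: " ++ v ++ "\n"
  else pvTitle k ++ "\t: " ++ v ++ "\n"

def get_opendachs_information_py (raw : List (String × String)) : String :=
  (PySem.List.sorted raw (fun x => x.1) false).foldl
    (fun acc kv => if kv.1 ∈ ["email", "url", "ticket"] then acc ++ pvFmtA kv.1 kv.2 else acc) ""

-- ===== PORT B =====
-- the fixed table of the three meaningful keys, in their sorted order, with their labels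
def pvLabels : List (String × String) := [("email", "E-Mail"), ("ticket", "Ticket"), ("url", "URL")]

def get_opendachs_information_py_alt (raw : List (String × String)) : String :=
  pvLabels.foldl
    (fun acc kl =>
      match (PySem.Dict.mk raw).get? kl.1 with
      | some v => acc ++ (kl.2 ++ "\t: " ++ v ++ "\n")
      | none => acc) ""

-- ===== PRECONDITION & SPEC =====
-- Pre_ excludes association lists with duplicate keys: those do not represent a Python dict
-- (the argument of A is contractually a dict), and on them A's port formats every duplicate
-- while B's port looks each key up once.
def Pre_get_opendachs_information_py (raw : List (String × String)) : Prop :=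
  (raw.map Prod.fst).Nodup
instance (raw : List (String × String)) : Decidable (Pre_get_opendachs_information_py raw) := by
  unfold Pre_get_opendachs_information_py; infer_instance

def pvWitness_get_opendachs_information_py : (List (String × String)) :=
  [("url", "http://x"), ("email", "a@b"), ("status", "open")]

def Spec_get_opendachs_information_py (raw : List (String × String)) (out : String) : Prop := out = get_opendachs_information_py_alt raw
instance (raw : List (String × String)) (out : String) : Decidable (Spec_get_opendachs_information_py raw out) := by unfold Spec_get_opendachs_information_py; infer_instance

-- ===== CLAIM (what is proved, stated in full; the proofs are below) =====
def Claim_equal_get_opendachs_information_py : Prop := ∀ (raw : List (String × String)), Dom_get_opendachs_information_py raw → Pre_get_opendachs_information_py raw → Spec_get_opendachs_information_py raw (get_opendachs_information_py raw)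

-- ===== LEMMAS AND PROOFS =====

-- the membership test of A's loop, as a decidable predicate on an item
def pvKeep (kv : String × String) : Bool := decide (kv.1 ∈ (["email", "url", "ticket"] : List String))

-- the canonical filtered list: for each meaningful key (in sorted order) its unique entry, if any
def pvOpt (raw : List (String × String)) (k : String) : List (String × String) :=
  match (PySem.Dict.mk raw).get? k with
  | some v => [(k, v)]
  | none => []

def pvCanon (raw : List (String × String)) : List (String × String) :=
  pvOpt raw "email" ++ pvOpt raw "ticket" ++ pvOpt raw "url"

lemma foldl_skip_eq_foldl_filter (f : String → (String × String) → String)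
    (l : List (String × String)) (acc : String) :
    l.foldl (fun a kv => if pvKeep kv then f a kv else a) acc
      = (l.filter pvKeep).foldl f acc := by
  induction l generalizing acc with
  | nil => rfl
  | cons x t ih =>
    by_cases h : pvKeep x = true <;> simp [h, ih]

lemma filter_eq_pvOpt (raw : List (String × String)) (k : String)
    (h : (raw.map Prod.fst).Nodup) :
    raw.filter (fun kv => kv.1 == k) = pvOpt raw k := by
  induction raw with
  | nil => rfl
  | cons x t ih =>
    obtain ⟨a, b⟩ := x
    simp only [List.map_cons, List.nodup_cons] at h
    by_cases hx : a = k
    · subst hx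
      have ht : t.filter (fun kv => kv.1 == a) = [] := by
        apply List.filter_eq_nil_iff.2
        intro kv hkv hk
        have hk' : kv.1 = a := by simpa using hk
        exact h.1 (hk' ▸ List.mem_map_of_mem (f := Prod.fst) hkv)
      simp [pvOpt, PySem.Dict.get?_mk_cons, ht]
    · simp only [pvOpt, PySem.Dict.get?_mk_cons, List.filter_cons]
      simp [hx]
      exact ih h.2

lemma title_ticket (x : String) :
    String.ofList (pvTitleChars false ['t','i','c','k','e','t']) ++ ("\t: " ++ x)
      = "Ticket\t: " ++ x := by
  have h : String.ofList (pvTitleChars false ['t','i','c','k','e','t']) = "Ticket" := by decide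
  rw [h, ← String.append_assoc]
  rfl

lemma filter_three_perm (l : List (String × String)) :
    (l.filter pvKeep).Perm
      (l.filter (fun kv => kv.1 == "email") ++ l.filter (fun kv => kv.1 == "ticket")
        ++ l.filter (fun kv => kv.1 == "url")) := by
  induction l with
  | nil => simp
  | cons x t ih =>
    by_cases h1 : x.1 = "email"
    · simpa [List.filter_cons, pvKeep, h1] using ih.cons x
    · by_cases h2 : x.1 = "ticket"
      · simp only [List.filter_cons, pvKeep, h2]
        simp only [decide_eq_true_eq]
        simp
        exact (ih.cons x).trans (by simpa using List.perm_middle.symm)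
      · by_cases h3 : x.1 = "url"
        · simp only [List.filter_cons, pvKeep, h3]
          simp only [decide_eq_true_eq]
          simp
          refine (ih.cons x).trans ?_
          have := List.perm_middle (a := x)
            (l₁ := t.filter (fun kv => kv.1 == "email") ++ t.filter (fun kv => kv.1 == "ticket"))
            (l₂ := t.filter (fun kv => kv.1 == "url"))
          simpa using this.symm
        · simpa [List.filter_cons, pvKeep, h1, h2, h3] using ih

lemma canon_pairwise (raw : List (String × String)) :
    (pvCanon raw).Pairwise (fun a b => a.1 < b.1) := by
  unfold pvCanon pvOpt
  rcases (PySem.Dict.mk raw).get? "email" with _ | v1 <;>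
    rcases (PySem.Dict.mk raw).get? "ticket" with _ | v2 <;>
      rcases (PySem.Dict.mk raw).get? "url" with _ | v3 <;>
        simp <;> decide

lemma canon_perm (raw : List (String × String)) (h : (raw.map Prod.fst).Nodup) :
    (pvCanon raw).Perm (raw.filter pvKeep) := by
  have e1 := filter_eq_pvOpt raw "email" h
  have e2 := filter_eq_pvOpt raw "ticket" h
  have e3 := filter_eq_pvOpt raw "url" h
  have := filter_three_perm raw
  rw [e1, e2, e3] at this
  exact this.symm

lemma filtered_sorted_eq_canon (raw : List (String × String))
    (h : (raw.map Prod.fst).Nodup) :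
    (PySem.List.sorted raw (fun x => x.1) false).filter pvKeep = pvCanon raw := by
  have hperm : (PySem.List.sorted raw (fun x => x.1) false).Perm raw :=
    PySem.List.sorted_perm raw (fun x => x.1) false
  -- strict pairwise order of the filtered sorted list
  have hle : (PySem.List.sorted raw (fun x => x.1) false).Pairwise (fun a b => a.1 ≤ b.1) :=
    PySem.List.sorted_pairwise raw (fun x => x.1)
  have hnd : ((PySem.List.sorted raw (fun x => x.1) false).map Prod.fst).Nodup :=
    ((hperm.map Prod.fst).nodup_iff).2 h
  have hne : (PySem.List.sorted raw (fun x => x.1) false).Pairwise (fun a b => a.1 ≠ b.1) :=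
    (List.pairwise_map).1 hnd
  have hlt : ((PySem.List.sorted raw (fun x => x.1) false).filter pvKeep).Pairwise
      (fun a b => a.1 < b.1) :=
    ((hle.and hne).imp (fun hab => lt_of_le_of_ne hab.1 hab.2)).filter pvKeep
  -- both lists are strictly key-increasing rearrangements of raw.filter pvKeep
  have p1 : ((PySem.List.sorted raw (fun x => x.1) false).filter pvKeep).Perm
      (raw.filter pvKeep) := hperm.filter pvKeep
  have s1 := PySem.List.sorted_eq_of_perm_of_pairwise_lt _ _ (fun x => x.1) p1 hlt
  have s2 := PySem.List.sorted_eq_of_perm_of_pairwise_lt _ _ (fun x => x.1)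
    (canon_perm raw h) (canon_pairwise raw)
  rw [← s1, ← s2]

-- ===== VERDICT (by name: the statement is the Claim_ definition above) =====
theorem get_opendachs_information_py_spec : Claim_equal_get_opendachs_information_py := by
  intro raw _ hpre
  unfold Spec_get_opendachs_information_py get_opendachs_information_py
  have hfun : (fun (acc : String) (kv : String × String) =>
      if kv.1 ∈ (["email", "url", "ticket"] : List String) then acc ++ pvFmtA kv.1 kv.2 else acc)
      = (fun acc kv => if pvKeep kv then acc ++ pvFmtA kv.1 kv.2 else acc) := by
    funext acc kv; simp [pvKeep]
  rw [hfun, foldl_skip_eq_foldl_filter, filtered_sorted_eq_canon raw hpre]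
  unfold get_opendachs_information_py_alt pvLabels pvCanon pvOpt
  rcases h1 : (PySem.Dict.mk raw).get? "email" with _ | v1 <;>
    rcases h2 : (PySem.Dict.mk raw).get? "ticket" with _ | v2 <;>
      rcases h3 : (PySem.Dict.mk raw).get? "url" with _ | v3 <;>
        simp [h1, h2, h3, List.foldl, pvFmtA, pvTitle, String.append_assoc, title_ticket]
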